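-- pv_equiv track=rewrite | github.com/santyb/friko_recomienda | recipe_generator.py | buscar_receta_real
-- ===== SOURCE A (Python) =====
-- from typing import Dict, List, Optional
--
-- PRODUCT_RECIPE_MAP = {
--     "Chuzos de contramuslo": ["chuzo"],
--     "Mini chuzos": ["chuzo", "mini"],
--     "Alitas BBQ": ["alitas"],
--     "Alitas picantes": ["alitas", "picante"],
--     "Nuggets de pollo": ["nugget"],
--     "Bombones BBQ": ["bombón", "bombones", "apanado"],
--     "Chorizo de pollo": ["chorizo"],
--     "Filete de pechuga": ["pechuga", "filete"],
--     "Lomitos de pechuga": ["lomito", "pechuga"],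
--     "Hamburguesa de salmón": ["hamburguesa", "salmón"],
--     "Brochetas de langostino": ["langostino", "brocheta"],
--     "Medallones de pescado": ["medallón", "pescado"],
--     "Dedos de merluza": ["merluza", "dedo"],
--     "Filete de salmón premium": ["salmón", "filete"],
--     "Camarón tití": ["camarón"],
-- }
--
-- def buscar_receta_real(producto: str, recetas: List[Dict]) -> Optional[Dict]:
--     """
--     Busca en la base de recetas reales una que coincida con el producto.
--     Devuelve la mejor coincidencia o None.
--     """
--     keywords = PRODUCT_RECIPE_MAP.get(producto, [producto.lower().split()[0]])
--
--     mejores = []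
--     for r in recetas:
--         titulo_lower = r["titulo"].lower()
--         matches = sum(1 for kw in keywords if kw.lower() in titulo_lower)
--         if matches > 0:
--             mejores.append((matches, r))
--
--     if mejores:
--         mejores.sort(key=lambda x: x[0], reverse=True)
--         return mejores[0][1]
--
--     return None
-- ===== SOURCE B (Python) =====
-- from typing import Dict, List, Optional
--
-- PRODUCT_RECIPE_MAP = {
--     "Chuzos de contramuslo": ["chuzo"],
--     "Mini chuzos": ["chuzo", "mini"],
--     "Alitas BBQ": ["alitas"],
--     "Alitas picantes": ["alitas", "picante"],
--     "Nuggets de pollo": ["nugget"],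
--     "Bombones BBQ": ["bombón", "bombones", "apanado"],
--     "Chorizo de pollo": ["chorizo"],
--     "Filete de pechuga": ["pechuga", "filete"],
--     "Lomitos de pechuga": ["lomito", "pechuga"],
--     "Hamburguesa de salmón": ["hamburguesa", "salmón"],
--     "Brochetas de langostino": ["langostino", "brocheta"],
--     "Medallones de pescado": ["medallón", "pescado"],
--     "Dedos de merluza": ["merluza", "dedo"],
--     "Filete de salmón premium": ["salmón", "filete"],
--     "Camarón tití": ["camarón"],
-- }
--
-- def buscar_receta_real(producto: str, recetas: List[Dict]) -> Optional[Dict]: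
--     """Staged: score every recipe, take the maximum score, return the first
--     recipe achieving it (None when nothing scores)."""
--     keywords = PRODUCT_RECIPE_MAP.get(producto, [producto.lower().split()[0]])
--     kws = [kw.lower() for kw in keywords]
--     counts = [len([kw for kw in kws if kw in r["titulo"].lower()]) for r in recetas]
--     best = max(counts, default=0)
--     if best == 0:
--         return None
--     for r, c in zip(recetas, counts):
--         if c == best:
--             return r
-- ===== Notes on version B (the rewrite author's own statement) =====
-- stated objective: alternative
-- what changed: Replaced A's build-a-(matches,recipe)-list then stable reverse sort then take head with a staged pipeline: score all recipes, take the maximum score with max(), and return the first recipe achieving it via a zip scan; the keyword/score derivation is unchanged (keywords lowercased once up front).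
import Mathlib
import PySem

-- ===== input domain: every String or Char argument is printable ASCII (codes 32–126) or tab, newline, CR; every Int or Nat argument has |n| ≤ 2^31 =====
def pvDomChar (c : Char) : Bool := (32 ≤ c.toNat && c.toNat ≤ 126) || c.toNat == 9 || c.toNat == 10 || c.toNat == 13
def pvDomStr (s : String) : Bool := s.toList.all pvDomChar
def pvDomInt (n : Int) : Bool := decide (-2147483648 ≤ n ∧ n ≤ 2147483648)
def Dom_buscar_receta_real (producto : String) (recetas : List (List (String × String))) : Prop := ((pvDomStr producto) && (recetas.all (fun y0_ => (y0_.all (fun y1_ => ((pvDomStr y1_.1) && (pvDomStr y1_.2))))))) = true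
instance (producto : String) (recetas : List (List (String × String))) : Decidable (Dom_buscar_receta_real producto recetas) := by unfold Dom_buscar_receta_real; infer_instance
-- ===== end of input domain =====

-- B replaces A's build-list-then-stable-reverse-sort with a staged pipeline (score all recipes,
-- max(), first recipe achieving it), an alternative decomposition of the same cost.


-- ===== PORT A =====
-- module constant PRODUCT_RECIPE_MAP (shared by both ports, as in the Python module)
def pvProductRecipeMap : PySem.Dict String (List String) := PySem.Dict.ofList [
  ("Chuzos de contramuslo", ["chuzo"]),
  ("Mini chuzos", ["chuzo", "mini"]),
  ("Alitas BBQ", ["alitas"]),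
  ("Alitas picantes", ["alitas", "picante"]),
  ("Nuggets de pollo", ["nugget"]),
  ("Bombones BBQ", ["bombón", "bombones", "apanado"]),
  ("Chorizo de pollo", ["chorizo"]),
  ("Filete de pechuga", ["pechuga", "filete"]),
  ("Lomitos de pechuga", ["lomito", "pechuga"]),
  ("Hamburguesa de salmón", ["hamburguesa", "salmón"]),
  ("Brochetas de langostino", ["langostino", "brocheta"]),
  ("Medallones de pescado", ["medallón", "pescado"]),
  ("Dedos de merluza", ["merluza", "dedo"]),
  ("Filete de salmón premium", ["salmón", "filete"]),
  ("Camarón tití", ["camarón"])]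

-- A-side helpers (A's three expressions, kept as in the Python lines):
-- PRODUCT_RECIPE_MAP.get(producto, [producto.lower().split()[0]]);
-- headD "" stands for the [0]: Python raises IndexError when split() is empty (excluded by Pre_).
def pvKeywordsA (producto : String) : List String :=
  (pvProductRecipeMap.get? producto).getD [(PySem.Str.split₀ (PySem.Str.lower producto)).headD ""]

-- r["titulo"]: first-match dict lookup; getD "" stands for Python's KeyError (excluded by Pre_).
def pvTituloA (r : List (String × String)) : String :=
  ((r.find? (fun p => p.1 == "titulo")).map (·.2)).getD ""

-- matches = sum(1 for kw in keywords if kw.lower() in r["titulo"].lower())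
def pvMatchesA (keywords : List String) (r : List (String × String)) : Nat :=
  keywords.countP (fun kw => PySem.Str.isIn (PySem.Str.lower kw) (PySem.Str.lower (pvTituloA r)))

def buscar_receta_real (producto : String) (recetas : List (List (String × String))) : Option (List (String × String)) :=
  let keywords := pvKeywordsA producto
  let mejores := recetas.foldl
    (fun acc r =>
      let m := pvMatchesA keywords r
      if 0 < m then acc ++ [(m, r)] else acc)
    ([] : List (Nat × List (String × String)))
  match PySem.List.sorted mejores (fun x => x.1) true with
  | [] => none
  | p :: _ => some p.2

-- ===== PORT B =====
-- Source B inline: keywords, kws = lowered keywords, counts = per-recipe score list,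
-- best = max(counts, default=0) (exact: scores are non-negative, so foldl max 0 = max),
-- then the first recipe whose count equals best (the zip scan), None when best == 0.
def buscar_receta_real_alt (producto : String) (recetas : List (List (String × String))) : Option (List (String × String)) :=
  let keywords := (pvProductRecipeMap.get? producto).getD
    [(PySem.Str.split₀ (PySem.Str.lower producto)).headD ""]
  let kws := keywords.map PySem.Str.lower
  let counts := recetas.map (fun r =>
    (kws.filter (fun kw =>
      PySem.Str.isIn kw (PySem.Str.lower (((r.find? (fun p => p.1 == "titulo")).map (·.2)).getD "")))).length)
  let best := counts.foldl Nat.max 0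
  if best = 0 then none
  else ((recetas.zip counts).find? (fun rc => rc.2 == best)).map (·.1)

-- ===== PRECONDITION & SPEC =====
-- Pre_ excludes exactly the inputs where the Python A raises: producto whose lower().split() is
-- empty (IndexError on the eagerly evaluated default) or a receta without a "titulo" key (KeyError).
def Pre_buscar_receta_real (producto : String) (recetas : List (List (String × String))) : Prop :=
  PySem.Str.split₀ (PySem.Str.lower producto) ≠ [] ∧
  ∀ r ∈ recetas, (r.find? (fun p => p.1 == "titulo")).isSome
instance (producto : String) (recetas : List (List (String × String))) : Decidable (Pre_buscar_receta_real producto recetas) := by unfold Pre_buscar_receta_real; infer_instance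

def pvWitness_buscar_receta_real : String × (List (List (String × String))) :=
  ("alitas bbq", [[("titulo", "Alitas BBQ al horno"), ("tiempo", "30")], [("titulo", "Sopa")]])

def Spec_buscar_receta_real (producto : String) (recetas : List (List (String × String))) (out : Option (List (String × String))) : Prop := out = buscar_receta_real_alt producto recetas
instance (producto : String) (recetas : List (List (String × String))) (out : Option (List (String × String))) : Decidable (Spec_buscar_receta_real producto recetas out) := by unfold Spec_buscar_receta_real; infer_instance

-- ===== CLAIM (what is proved, stated in full; the proofs are below) =====
def Claim_equal_buscar_receta_real : Prop := ∀ (producto : String) (recetas : List (List (String × String))), Dom_buscar_receta_real producto recetas → Pre_buscar_receta_real producto recetas → Spec_buscar_receta_real producto recetas (buscar_receta_real producto recetas)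

-- ===== LEMMAS AND PROOFS =====

-- the argmax step on an Option state: first element with the strictly greatest key wins
def pvPick {R : Type} (o : Option (Nat × R)) (x : Nat × R) : Option (Nat × R) :=
  match o with
  | none => some x
  | some h => if h.1 < x.1 then some x else some h

theorem head?_insertBy {α : Type} (before : α → α → Bool) (x : α) (ys : List α) :
    (PySem.List.insertBy before x ys).head? =
      some (match ys with | [] => x | y :: _ => if before x y then x else y) := by
  cases ys with
  | nil => simp [PySem.List.insertBy]
  | cons y t =>
    by_cases h : before x y <;> simp [PySem.List.insertBy, h]

theorem head?_foldl_insertBy {α : Type} (before : α → α → Bool) (ps : List α) (acc : List α) :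
    (ps.foldl (fun a x => PySem.List.insertBy before x a) acc).head? =
      ps.foldl (fun o x =>
        match o with
        | none => some x
        | some h => if before x h then some x else some h) acc.head? := by
  induction ps generalizing acc with
  | nil => rfl
  | cons x t ih =>
    simp only [List.foldl_cons]
    rw [ih, head?_insertBy]
    cases acc <;> simp [apply_ite]

theorem head?_sorted_rev {R : Type} (ps : List (Nat × R)) :
    (PySem.List.sorted ps (fun x => x.1) true).head? = ps.foldl pvPick none := by
  rw [PySem.List.sorted_rev_eq_foldl_insertBy, head?_foldl_insertBy]
  simp only [List.head?_nil]
  apply List.foldl_ext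
  intro o x _
  cases o <;> simp [pvPick]

-- invariant tying an argmax (best_count, best_r) state to the argmax-over-pairs state
def pvInv {R : Type} (o : Option (Nat × R)) (st : Nat × Option R) : Prop :=
  match o with
  | none => st = (0, none)
  | some p => st = (p.1, some p.2)

theorem afold_acc (keywords : List String) (t : List (List (String × String)))
    (acc : List (Nat × List (String × String))) :
    t.foldl (fun acc r =>
        let m := pvMatchesA keywords r
        if 0 < m then acc ++ [(m, r)] else acc) acc =
      acc ++ t.foldl (fun acc r =>
        let m := pvMatchesA keywords r
        if 0 < m then acc ++ [(m, r)] else acc) [] := by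
  induction t generalizing acc with
  | nil => simp
  | cons x t ih =>
    simp only [List.foldl_cons]
    rw [ih, ih ((if 0 < pvMatchesA keywords x then [] ++ [(pvMatchesA keywords x, x)] else []))]
    split_ifs <;> simp

-- A's filtered-pairs pvPick fold equals the plain strict-argmax fold over all recipes
theorem main_fold {keywords : List String} (recetas : List (List (String × String)))
    (o : Option (Nat × List (String × String))) (st : Nat × Option (List (String × String)))
    (hinv : pvInv o st) :
    (recetas.foldl
      (fun (st : Nat × Option (List (String × String))) r =>
        let m := pvMatchesA keywords r
        if st.1 < m then (m, some r) else st) st).2 =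
    ((recetas.foldl
      (fun acc r =>
        let m := pvMatchesA keywords r
        if 0 < m then acc ++ [(m, r)] else acc)
      ([] : List (Nat × List (String × String)))).foldl pvPick o).map (·.2) := by
  induction recetas generalizing o st with
  | nil =>
    cases o with
    | none => simp [pvInv] at hinv; simp [hinv]
    | some p => simp [pvInv] at hinv; simp [hinv]
  | cons r t ih =>
    simp only [List.foldl_cons]
    rw [afold_acc keywords t, List.foldl_append]
    by_cases hm : 0 < pvMatchesA keywords r
    · rw [if_pos hm]
      simp only [List.nil_append, List.foldl_cons, List.foldl_nil]
      cases o with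
      | none =>
        simp only [pvInv] at hinv; subst hinv
        rw [if_pos hm]
        exact ih _ _ (by simp [pvInv, pvPick])
      | some p =>
        simp only [pvInv] at hinv; subst hinv
        by_cases hlt : p.1 < pvMatchesA keywords r
        · rw [if_pos hlt]
          exact ih _ _ (by simp [pvInv, pvPick, hlt])
        · rw [if_neg hlt]
          exact ih _ _ (by simp [pvInv, pvPick, hlt])
    · rw [if_neg hm]
      have hm0 : pvMatchesA keywords r = 0 := by omega
      simp only [List.foldl_nil]
      cases o with
      | none =>
        simp only [pvInv] at hinv; subst hinv
        rw [hm0, if_neg (by omega)]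
        exact ih _ _ (by simp [pvInv])
      | some p =>
        simp only [pvInv] at hinv; subst hinv
        rw [hm0, if_neg (by omega)]
        exact ih _ _ (by simp [pvInv])

-- every score is bounded by the running max
theorem le_maxfold {R : Type} (f : R → Nat) (l : List R) :
    ∀ r ∈ l, f r ≤ (l.map f).foldl Nat.max 0 := by
  have key : ∀ (m : List Nat) (b : Nat), b ≤ m.foldl Nat.max b ∧ ∀ a ∈ m, a ≤ m.foldl Nat.max b := by
    intro m
    induction m with
    | nil => intro b; simp
    | cons a t ih =>
      intro b
      simp only [List.foldl_cons]
      refine ⟨le_trans (Nat.le_max_left b a) (ih _).1, ?_⟩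
      intro x hx
      rcases List.mem_cons.mp hx with hx | hx
      · subst hx; exact le_trans (Nat.le_max_right b x) (ih _).1
      · exact (ih _).2 x hx
  intro r hr
  exact (key (l.map f) 0).2 (f r) (List.mem_map_of_mem hr)

-- the max of the scores is attained when it is positive
theorem maxfold_mem {R : Type} (f : R → Nat) (l : List R)
    (h : (l.map f).foldl Nat.max 0 ≠ 0) : ∃ r ∈ l, f r = (l.map f).foldl Nat.max 0 := by
  have key : ∀ (m : List Nat) (b : Nat), m.foldl Nat.max b = b ∨ m.foldl Nat.max b ∈ m := by
    intro m
    induction m with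
    | nil => intro b; left; rfl
    | cons a t ih =>
      intro b
      simp only [List.foldl_cons]
      rcases ih (Nat.max b a) with h1 | h1
      · rw [h1]
        rcases Nat.le_total b a with hba | hab
        · right
          have hba2 : Nat.max b a = a := Nat.max_eq_right hba
          rw [hba2]
          exact List.mem_cons_self
        · left; exact Nat.max_eq_left hab
      · right; exact List.mem_cons.mpr (Or.inr h1)
  rcases key (l.map f) 0 with h1 | h1
  · exact absurd h1 h
  · rcases List.mem_map.mp h1 with ⟨r, hr, hfr⟩
    exact ⟨r, hr, hfr⟩

-- the strict-argmax fold = (max score, first recipe achieving it)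
theorem argmax_eq {R : Type} (f : R → Nat) (l : List R) :
    l.foldl (fun (st : Nat × Option R) r => if st.1 < f r then (f r, some r) else st) (0, none) =
      ((l.map f).foldl Nat.max 0,
        if (l.map f).foldl Nat.max 0 = 0 then none
        else l.find? (fun r => f r == (l.map f).foldl Nat.max 0)) := by
  induction l using List.reverseRecOn with
  | nil => simp
  | append_singleton l x ih =>
    have hmax : ((l ++ [x]).map f).foldl Nat.max 0 =
        Nat.max ((l.map f).foldl Nat.max 0) (f x) := by
      simp [List.foldl_append]
    rw [List.foldl_append, ih]
    simp only [List.foldl_cons, List.foldl_nil]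
    set best := (l.map f).foldl Nat.max 0 with hbest
    by_cases h : best < f x
    · rw [if_pos h, hmax]
      have hm : Nat.max best (f x) = f x := Nat.max_eq_right (le_of_lt h)
      rw [hm, if_neg (by omega : ¬ f x = 0)]
      have hnone : l.find? (fun r => f r == f x) = none := by
        apply List.find?_eq_none.mpr
        intro r hr
        have := le_maxfold f l r hr
        simp only [beq_iff_eq]
        omega
      rw [List.find?_append, hnone]
      simp
    · rw [if_neg h, hmax]
      have hm : Nat.max best (f x) = best := Nat.max_eq_left (Nat.le_of_not_lt h)
      rw [hm]
      by_cases hb : best = 0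
      · rw [if_pos hb, if_pos hb]
      · rw [if_neg hb, if_neg hb]
        rcases maxfold_mem f l hb with ⟨r, hr, hfr⟩
        have hsome : (l.find? (fun r => f r == best)).isSome := by
          rw [List.find?_isSome]
          exact ⟨r, hr, by simp [hfr, hbest]⟩
        rw [List.find?_append]
        cases hfind : l.find? (fun r => f r == best) with
        | none => rw [hfind] at hsome; simp at hsome
        | some v => simp

-- zipping a list with its own image is mapping to pairs
theorem zip_self_map {R : Type} (f : R → Nat) (l : List R) :
    l.zip (l.map f) = l.map (fun r => (r, f r)) := by
  induction l with
  | nil => rfl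
  | cons a t ih => simp [ih]

-- B's staged max-then-first-hit pipeline equals the strict-argmax fold
theorem B_shape {R : Type} (f : R → Nat) (l : List R) :
    (if (l.map f).foldl Nat.max 0 = 0 then none
     else ((l.zip (l.map f)).find? (fun rc => rc.2 == (l.map f).foldl Nat.max 0)).map (·.1))
    = (l.foldl (fun (st : Nat × Option R) r => if st.1 < f r then (f r, some r) else st) (0, none)).2 := by
  rw [argmax_eq, zip_self_map]
  by_cases h : (l.map f).foldl Nat.max 0 = 0
  · simp [h]
  · simp only [if_neg h]
    rw [List.find?_map, Option.map_map]
    rw [show ((fun rc : R × Nat => rc.2 == (l.map f).foldl Nat.max 0) ∘ fun r => (r, f r))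
        = (fun r => f r == (l.map f).foldl Nat.max 0) from rfl]
    cases List.find? (fun r => f r == (l.map f).foldl Nat.max 0) l <;> rfl

-- B's per-recipe score is A's pvMatchesA
theorem count_eq (keywords : List String) (r : List (String × String)) :
    ((keywords.map PySem.Str.lower).filter (fun kw =>
      PySem.Str.isIn kw (PySem.Str.lower (((r.find? (fun p => p.1 == "titulo")).map (·.2)).getD "")))).length
      = pvMatchesA keywords r := by
  rw [← List.countP_eq_length_filter, List.countP_map]
  rfl

-- ===== VERDICT (by name: the statement is the Claim_ definition above) =====
theorem buscar_receta_real_spec : Claim_equal_buscar_receta_real := by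
  intro producto recetas _ _
  unfold Spec_buscar_receta_real buscar_receta_real buscar_receta_real_alt
  simp only
  rw [show ∀ (l : List (Nat × List (String × String))),
        (match PySem.List.sorted l (fun x => x.1) true with
          | [] => (none : Option (List (String × String)))
          | p :: _ => some p.2) =
        ((PySem.List.sorted l (fun x => x.1) true).head?).map (·.2) from by
      intro l; cases h : PySem.List.sorted l (fun x => x.1) true <;> simp]
  rw [head?_sorted_rev]
  rw [← main_fold recetas none (0, none) (by simp [pvInv])]
  have hcounts : recetas.map (fun r =>
      (((pvKeywordsA producto).map PySem.Str.lower).filter (fun kw =>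
        PySem.Str.isIn kw (PySem.Str.lower (((r.find? (fun p => p.1 == "titulo")).map (·.2)).getD "")))).length)
      = recetas.map (fun r => pvMatchesA (pvKeywordsA producto) r) :=
    List.map_congr_left (fun r _ => count_eq (pvKeywordsA producto) r)
  calc (recetas.foldl
      (fun (st : Nat × Option (List (String × String))) r =>
        if st.1 < pvMatchesA (pvKeywordsA producto) r
        then (pvMatchesA (pvKeywordsA producto) r, some r) else st) (0, none)).2
      = (if (recetas.map (fun r => pvMatchesA (pvKeywordsA producto) r)).foldl Nat.max 0 = 0 then none
         else ((recetas.zip (recetas.map (fun r => pvMatchesA (pvKeywordsA producto) r))).find?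
            (fun rc => rc.2 == (recetas.map (fun r => pvMatchesA (pvKeywordsA producto) r)).foldl Nat.max 0)).map (·.1)) :=
        (B_shape (fun r => pvMatchesA (pvKeywordsA producto) r) recetas).symm
    _ = _ := by rw [← hcounts]; rfl
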